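-- pv_equiv track=rewrite | github.com/hahas94/kitten | miscellaneous/mathemagicians/main.py | count_fields
-- ===== SOURCE A (Python) =====
-- def count_fields(configuration: str) -> int:
--     """Count and return the number of contiguous subfields in a configuration."""
--     if len(set(configuration)) == 1:
--         return 1
--
--     n_fields = 1
--     curr_bit_value = configuration[0]
--
--     for i in range(1, len(configuration)):
--         if configuration[i] == curr_bit_value:
--             continue
--         else:
--             n_fields += 1
--             curr_bit_value = configuration[i]
--
--     if configuration[0] == configuration[-1]:
--         n_fields -= 1
--
--     return n_fields
-- ===== SOURCE B (Python) =====
-- def count_fields(configuration: str) -> int: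
--     """Count contiguous subfields: rotate the circular configuration to start
--     at a run boundary, then count the linear runs of the rotation (the rotation
--     makes the circular runs line up with linear ones, so no endpoint fix-up)."""
--     j = next((i for i, c in enumerate(configuration) if c != configuration[0]), None)
--     if j is None:
--         return 1
--     rotated = configuration[j:] + configuration[:j]
--     runs = 0
--     prev = None
--     for c in rotated:
--         if c != prev:
--             runs += 1
--             prev = c
--     return runs
-- ===== Notes on version B (the rewrite author's own statement) =====
-- stated objective: alternative
-- what changed: Instead of A's set-uniformity guard, sentinel-tracking transition loop and wrap-around endpoint correction, B rotates the circular configuration to the first run boundary and counts the linear runs of the rotation, which needs no endpoint fix-up.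
import Mathlib
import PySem

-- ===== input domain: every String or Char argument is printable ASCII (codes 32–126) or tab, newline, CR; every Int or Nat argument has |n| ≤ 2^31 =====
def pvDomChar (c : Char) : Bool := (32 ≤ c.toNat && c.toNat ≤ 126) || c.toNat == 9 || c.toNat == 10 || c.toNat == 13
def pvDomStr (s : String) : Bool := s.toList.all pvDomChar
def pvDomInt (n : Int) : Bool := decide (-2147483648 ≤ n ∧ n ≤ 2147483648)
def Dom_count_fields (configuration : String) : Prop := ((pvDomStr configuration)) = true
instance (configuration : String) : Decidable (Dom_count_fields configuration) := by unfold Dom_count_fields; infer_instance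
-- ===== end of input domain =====

-- B rotates the circular configuration to the first run boundary and counts linear runs
-- of the rotation, replacing A's set guard + transition loop + endpoint correction
-- (objective: alternative); return-value equivalence only.

-- ===== PORT A =====
def count_fields (configuration : String) : Int :=
  let cs := configuration.toList
  if (PySem.Set.ofList cs).length = 1 then 1
  else
    match cs with
    | [] => 0   -- Python raises IndexError here (configuration[0]); excluded by Pre_
    | c0 :: rest =>
      let st := rest.foldl
        (fun (st : Int × Char) c => if c = st.2 then st else (st.1 + 1, c)) (1, c0)
      -- configuration[-1] on a nonempty string is the last character
      if c0 = rest.getLastD c0 then st.1 - 1 else st.1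

-- ===== PORT B =====
-- next((i for i, c in enumerate(configuration) if c != configuration[0]), None):
-- first index whose char differs from c0 (the generator never indexes an empty string)
def pvFindDiff (c0 : Char) : List Char → Nat → Option Nat
  | [], _ => none
  | c :: cs, i => if c ≠ c0 then some i else pvFindDiff c0 cs (i + 1)

-- one body of B's run-counting loop: `if c != prev: runs += 1; prev = c`
def pvRunStep (st : Int × Option Char) (c : Char) : Int × Option Char :=
  if some c ≠ st.2 then (st.1 + 1, some c) else st

def count_fields_alt (configuration : String) : Int :=
  let cs := configuration.toList
  match cs with
  | [] => 1   -- empty enumerate: next yields the default None, so return 1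
  | c0 :: _ =>
    match pvFindDiff c0 cs 0 with
    | none => 1
    | some j =>
      let rotated := PySem.List.slice cs (some (j : Int)) none ++
                     PySem.List.slice cs none (some (j : Int))
      (rotated.foldl pvRunStep (0, none)).1

-- ===== PRECONDITION & SPEC =====
-- Pre_ excludes only the empty string, on which A raises IndexError (configuration[0]).
def Pre_count_fields (configuration : String) : Prop := configuration.toList ≠ []
instance (configuration : String) : Decidable (Pre_count_fields configuration) := by unfold Pre_count_fields; infer_instance
def pvWitness_count_fields : String := "0110"

def Spec_count_fields (configuration : String) (out : Int) : Prop := out = count_fields_alt configuration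
instance (configuration : String) (out : Int) : Decidable (Spec_count_fields configuration out) := by unfold Spec_count_fields; infer_instance

-- ===== CLAIM =====
def Claim_equal_count_fields : Prop := ∀ (configuration : String), Dom_count_fields configuration → Pre_count_fields configuration → Spec_count_fields configuration (count_fields configuration)

-- ===== LEMMAS AND PROOFS =====

-- number of adjacent unequal pairs in p :: l
def adjcnt : Char → List Char → Int
  | _, [] => 0
  | p, c :: cs => (if c = p then 0 else 1) + adjcnt c cs

theorem lastD_cons (c : Char) (cs : List Char) (d : Char) :
    (c :: cs).getLastD d = cs.getLastD c := by
  cases cs <;> simp [List.getLastD]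

theorem foldA_eq (rest : List Char) (c0 : Char) (k : Int) :
    rest.foldl (fun (st : Int × Char) c => if c = st.2 then st else (st.1 + 1, c)) (k, c0)
      = (k + adjcnt c0 rest, rest.getLastD c0) := by
  induction rest generalizing c0 k with
  | nil => simp [adjcnt]
  | cons c cs ih =>
    rw [List.foldl_cons, lastD_cons]
    show cs.foldl _ (if c = c0 then (k, c0) else (k + 1, c)) = _
    by_cases h : c = c0
    · subst h; rw [if_pos rfl, ih]; simp [adjcnt]
    · rw [if_neg h, ih]; simp [adjcnt, h]; ring

theorem foldB_some (l : List Char) (p : Char) (k : Int) :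
    l.foldl pvRunStep (k, some p) = (k + adjcnt p l, some (l.getLastD p)) := by
  induction l generalizing p k with
  | nil => simp [adjcnt]
  | cons c cs ih =>
    rw [List.foldl_cons, lastD_cons]
    by_cases h : c = p
    · subst h
      rw [show pvRunStep (k, some c) c = (k, some c) by simp [pvRunStep], ih]
      simp [adjcnt]
    · rw [show pvRunStep (k, some p) c = (k + 1, some c) by simp [pvRunStep, h], ih]
      simp [adjcnt, h]; ring

theorem pvFindDiff_none (c0 : Char) (l : List Char) (i : Nat)
    (h : pvFindDiff c0 l i = none) : ∀ c ∈ l, c = c0 := by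
  induction l generalizing i with
  | nil => simp
  | cons c cs ih =>
    by_cases hc : c = c0
    · have h' : pvFindDiff c0 cs (i + 1) = none := by simpa [pvFindDiff, hc] using h
      simp only [List.mem_cons]
      rintro x (rfl | hx)
      · exact hc
      · exact ih (i + 1) h' x hx
    · simp [pvFindDiff, hc] at h

theorem pvFindDiff_some (c0 : Char) (l : List Char) (i j : Nat)
    (h : pvFindDiff c0 l i = some j) :
    ∃ pre b suf, l = pre ++ b :: suf ∧ (∀ c ∈ pre, c = c0) ∧ b ≠ c0 ∧ j = i + pre.length := by
  induction l generalizing i with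
  | nil => simp [pvFindDiff] at h
  | cons c cs ih =>
    by_cases hc : c = c0
    · have h' : pvFindDiff c0 cs (i + 1) = some j := by simpa [pvFindDiff, hc] using h
      obtain ⟨pre, b, suf, hl, hall, hb, hj⟩ := ih (i + 1) h'
      refine ⟨c :: pre, b, suf, by simp [hl], ?_, hb, by simp; omega⟩
      simp only [List.mem_cons]
      rintro x (rfl | hx)
      · exact hc
      · exact hall x hx
    · have hj : i = j := by simpa [pvFindDiff, hc] using h
      exact ⟨[], c, cs, rfl, by simp, hc, by simp [hj.symm]⟩

theorem adjcnt_append (xs ys : List Char) (p : Char) :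
    adjcnt p (xs ++ ys) = adjcnt p xs + adjcnt (xs.getLastD p) ys := by
  induction xs generalizing p with
  | nil => simp [adjcnt]
  | cons c cs ih =>
    rw [List.cons_append, lastD_cons]
    show adjcnt p (c :: (cs ++ ys)) = _
    simp only [adjcnt, ih]
    ring

theorem adjcnt_all_eq (pre : List Char) (c0 : Char) (h : ∀ c ∈ pre, c = c0) :
    adjcnt c0 pre = 0 := by
  induction pre with
  | nil => rfl
  | cons c cs ih =>
    have hc : c = c0 := h c (by simp)
    subst hc
    simp only [adjcnt]
    rw [ih (fun x hx => h x (by simp [hx]))]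
    simp

theorem getLastD_all_eq (pre : List Char) (c0 : Char) (h : ∀ c ∈ pre, c = c0) :
    pre.getLastD c0 = c0 := by
  induction pre generalizing c0 with
  | nil => rfl
  | cons c cs ih =>
    rw [lastD_cons]
    have hc : c = c0 := h c (by simp)
    subst hc
    exact ih c (fun x hx => h x (by simp [hx]))

theorem getLastD_append_cons (xs suf : List Char) (b d : Char) :
    (xs ++ b :: suf).getLastD d = suf.getLastD b := by
  induction xs generalizing d with
  | nil => rw [List.nil_append, lastD_cons]
  | cons c cs ih => rw [List.cons_append, lastD_cons, ih]

theorem ofList_all_eq (l : List Char) (c0 : Char) (h : ∀ c ∈ l, c = c0) :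
    PySem.Set.ofList (c0 :: l) = [c0] := by
  have key : ∀ (m : List Char), (∀ c ∈ m, c = c0) → m.foldl PySem.Set.add [c0] = [c0] := by
    intro m
    induction m with
    | nil => intro _; rfl
    | cons c cs ih =>
      intro hall
      have hc : c = c0 := hall c (by simp)
      subst hc
      rw [List.foldl_cons, show PySem.Set.add [c] c = [c] by simp [PySem.Set.add, PySem.Set.contains]]
      exact ih (fun x hx => hall x (by simp [hx]))
  rw [PySem.Set.ofList_eq_foldl, List.foldl_cons,
      show PySem.Set.add [] c0 = [c0] by simp [PySem.Set.add, PySem.Set.contains]]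
  exact key l h

-- guard: len(set(cs)) == 1 on c0 :: rest means every char equals c0
theorem set_len_one_iff (c0 : Char) (rest : List Char) :
    (PySem.Set.ofList (c0 :: rest)).length = 1 ↔ ∀ c ∈ rest, c = c0 := by
  constructor
  · intro h c hc
    obtain ⟨x, hx⟩ : ∃ x, PySem.Set.ofList (c0 :: rest) = [x] := by
      rcases hs : PySem.Set.ofList (c0 :: rest) with _ | ⟨x, _ | ⟨y, t⟩⟩
      · rw [hs] at h; simp at h
      · exact ⟨x, rfl⟩
      · rw [hs] at h; simp at h
    have h0 : c0 ∈ PySem.Set.ofList (c0 :: rest) := by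
      rw [PySem.Set.mem_ofList]; simp
    have h1 : c ∈ PySem.Set.ofList (c0 :: rest) := by
      rw [PySem.Set.mem_ofList]; simp [hc]
    rw [hx, List.mem_singleton] at h0 h1
    exact h1.trans h0.symm
  · intro h
    rw [ofList_all_eq rest c0 h]
    rfl

-- ===== VERDICT =====
theorem count_fields_spec : Claim_equal_count_fields := by
  intro cfg _ hpre
  unfold Spec_count_fields count_fields count_fields_alt
  cases hcs : cfg.toList with
  | nil => exact absurd hcs hpre
  | cons c0 rest =>
    have hstep : pvFindDiff c0 (c0 :: rest) 0 = pvFindDiff c0 rest 1 := by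
      simp [pvFindDiff]
    cases hfd : pvFindDiff c0 rest 1 with
    | none =>
      have hall := pvFindDiff_none c0 rest 1 hfd
      have hg : (PySem.Set.ofList (c0 :: rest)).length = 1 := (set_len_one_iff c0 rest).mpr hall
      simp [hstep, hfd, hg]
    | some j =>
      obtain ⟨pre, b, suf, hl, hall, hb, hj⟩ := pvFindDiff_some c0 rest 1 j hfd
      have hg : ¬ (PySem.Set.ofList (c0 :: rest)).length = 1 := by
        intro h
        exact hb (((set_len_one_iff c0 rest).mp h) b (by simp [hl]))
      have hjn : j = pre.length + 1 := by omega
      subst hjn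
      have hdrop : PySem.List.slice (c0 :: rest) (some ((pre.length + 1 : Nat) : Int)) none
          = b :: suf := by
        rw [PySem.List.slice_from_natCast, hl]
        show List.drop (pre.length + 1) (c0 :: (pre ++ b :: suf)) = b :: suf
        rw [List.drop_succ_cons, List.drop_left]
      have htake : PySem.List.slice (c0 :: rest) none (some ((pre.length + 1 : Nat) : Int))
          = c0 :: pre := by
        rw [PySem.List.slice_to_natCast, hl]
        show List.take (pre.length + 1) (c0 :: (pre ++ b :: suf)) = c0 :: pre
        rw [List.take_succ_cons, List.take_left]
      simp only [hg, if_false, hstep, hfd, hdrop, htake, foldA_eq, List.cons_append,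
        List.foldl_cons]
      rw [show pvRunStep (0, none) b = (1, some b) by simp [pvRunStep], foldB_some]
      rw [hl, adjcnt_append, adjcnt_all_eq pre c0 hall, getLastD_all_eq pre c0 hall,
          getLastD_append_cons, adjcnt_append]
      simp only [adjcnt, adjcnt_all_eq pre c0 hall]
      rw [if_neg hb]
      split_ifs <;> ring
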